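-- pv_equiv track=rewrite | github.com/walberamorim/chat_medico | processar_dados.py | eliminar_classes_gramaticais_indesejadas
-- ===== SOURCE A (Python) =====
-- CLASSES_GRAMATICAIS_INDESEJADAS = [
--     "num",
--     "adv",
--     "v-inf",
--     "v-fin",
--     "v-pcp",
--     "v-ger",
-- ]
--
-- def eliminar_classes_gramaticais_indesejadas(tokens, classificacoes):
--     tokens_filtrados = []
--     for token in tokens:
--         if token in classificacoes.keys():
--             classificacao = classificacoes[token]
--             if not any (s in classificacao for s in CLASSES_GRAMATICAIS_INDESEJADAS):
--                 tokens_filtrados.append(token)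
--         else:
--             tokens_filtrados.append(token)
--     return tokens_filtrados
-- ===== SOURCE B (Python) =====
-- CLASSES_GRAMATICAIS_INDESEJADAS = [
--     "num",
--     "adv",
--     "v-inf",
--     "v-fin",
--     "v-pcp",
--     "v-ger",
-- ]
--
-- def eliminar_classes_gramaticais_indesejadas(tokens, classificacoes):
--     # Build once the index set of tokens with an unwanted classification,
--     # then filter by plain set membership (alternative decomposition).
--     bad = {k for k, v in classificacoes.items()
--            if any(s in v for s in CLASSES_GRAMATICAIS_INDESEJADAS)}
--     return [t for t in tokens if t not in bad]
-- ===== Notes on version B (the rewrite author's own statement) =====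
-- stated objective: alternative
-- what changed: B precomputes, in one pass over the dictionary, the set of keys whose classification contains an unwanted class, then filters the token list by set membership, instead of doing a dictionary lookup plus a substring scan per token.
import Mathlib
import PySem

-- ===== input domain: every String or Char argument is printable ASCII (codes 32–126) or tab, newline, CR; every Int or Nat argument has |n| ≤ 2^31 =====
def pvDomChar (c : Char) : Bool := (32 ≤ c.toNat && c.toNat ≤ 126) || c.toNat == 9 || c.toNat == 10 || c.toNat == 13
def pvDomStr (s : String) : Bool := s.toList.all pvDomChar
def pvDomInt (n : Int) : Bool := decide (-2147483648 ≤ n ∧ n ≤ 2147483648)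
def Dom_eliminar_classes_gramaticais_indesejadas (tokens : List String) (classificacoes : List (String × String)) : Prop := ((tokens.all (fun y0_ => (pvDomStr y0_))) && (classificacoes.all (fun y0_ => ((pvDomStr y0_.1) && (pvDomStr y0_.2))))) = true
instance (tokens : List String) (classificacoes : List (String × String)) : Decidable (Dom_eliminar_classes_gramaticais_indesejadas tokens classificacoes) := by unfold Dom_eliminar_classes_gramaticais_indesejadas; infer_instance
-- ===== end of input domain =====

-- B precomputes, in one pass over the dictionary, the set of keys with an unwanted
-- classification and then filters tokens by set membership (objective: alternative decomposition).

-- ===== PORT A =====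
def classesGramaticaisIndesejadas : List String := ["num", "adv", "v-inf", "v-fin", "v-pcp", "v-ger"]

-- the loop body's decision: token in keys → not any(s in classification); absent → keep
def pvKeepA (classificacoes : List (String × String)) (token : String) : Bool :=
  match (PySem.Dict.mk classificacoes).get? token with
  | some classificacao =>
      !(classesGramaticaisIndesejadas.any (fun s => PySem.Str.isIn s classificacao))
  | none => true

def eliminar_classes_gramaticais_indesejadas (tokens : List String) (classificacoes : List (String × String)) : List String :=
  tokens.foldl (fun tokens_filtrados token =>
    if pvKeepA classificacoes token then tokens_filtrados ++ [token] else tokens_filtrados) []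

-- ===== PORT B =====
def pvBadKeys (classificacoes : List (String × String)) : PySem.Set String :=
  PySem.Set.ofList ((classificacoes.filter
    (fun kv => classesGramaticaisIndesejadas.any (fun s => PySem.Str.isIn s kv.2))).map (·.1))

def eliminar_classes_gramaticais_indesejadas_alt (tokens : List String) (classificacoes : List (String × String)) : List String :=
  let bad := pvBadKeys classificacoes
  tokens.filter (fun t => !(PySem.Set.contains bad t))

-- ===== PRECONDITION & SPEC =====
-- Pre_ excludes association lists with duplicate keys: a Python dict cannot contain them,
-- so this excludes no Python-representable input.
def Pre_eliminar_classes_gramaticais_indesejadas (_tokens : List String) (classificacoes : List (String × String)) : Prop :=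
  (classificacoes.map Prod.fst).Nodup
instance (tokens : List String) (classificacoes : List (String × String)) : Decidable (Pre_eliminar_classes_gramaticais_indesejadas tokens classificacoes) := by unfold Pre_eliminar_classes_gramaticais_indesejadas; infer_instance

def pvWitness_eliminar_classes_gramaticais_indesejadas : List String × (List (String × String)) :=
  (["casa", "correr", "azul"], [("correr", "v-inf"), ("casa", "subst")])

def Spec_eliminar_classes_gramaticais_indesejadas (tokens : List String) (classificacoes : List (String × String)) (out : List String) : Prop := out = eliminar_classes_gramaticais_indesejadas_alt tokens classificacoes
instance (tokens : List String) (classificacoes : List (String × String)) (out : List String) : Decidable (Spec_eliminar_classes_gramaticais_indesejadas tokens classificacoes out) := by unfold Spec_eliminar_classes_gramaticais_indesejadas; infer_instance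

-- ===== CLAIM (what is proved, stated in full; the proofs are below) =====
def Claim_equal_eliminar_classes_gramaticais_indesejadas : Prop := ∀ (tokens : List String) (classificacoes : List (String × String)), Dom_eliminar_classes_gramaticais_indesejadas tokens classificacoes → Pre_eliminar_classes_gramaticais_indesejadas tokens classificacoes → Spec_eliminar_classes_gramaticais_indesejadas tokens classificacoes (eliminar_classes_gramaticais_indesejadas tokens classificacoes)

-- ===== LEMMAS AND PROOFS =====
theorem pvKeepA_cons_self (k v : String) (rest : List (String × String)) :
    pvKeepA ((k, v) :: rest) k = !(classesGramaticaisIndesejadas.any (fun s => PySem.Str.isIn s v)) := by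
  simp only [pvKeepA, PySem.Dict.get?_mk_cons, BEq.rfl, if_true]

theorem pvKeepA_cons_ne (k v t : String) (h : (k == t) = false) (rest : List (String × String)) :
    pvKeepA ((k, v) :: rest) t = pvKeepA rest t := by
  simp only [pvKeepA, PySem.Dict.get?_mk_cons, h, Bool.false_eq_true, if_false]

theorem pvKeep_eq_false_iff (classificacoes : List (String × String))
    (hn : (classificacoes.map Prod.fst).Nodup) (t : String) :
    pvKeepA classificacoes t = false ↔
      t ∈ (classificacoes.filter
        (fun kv => classesGramaticaisIndesejadas.any (fun s => PySem.Str.isIn s kv.2))).map Prod.fst := by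
  induction classificacoes with
  | nil => simp [pvKeepA, PySem.Dict.get?]
  | cons kv rest ih =>
    obtain ⟨k, v⟩ := kv
    simp only [List.map_cons, List.nodup_cons] at hn
    obtain ⟨hk, hrest⟩ := hn
    by_cases hkt : k = t
    · subst hkt
      rw [pvKeepA_cons_self]
      cases hbad : (classesGramaticaisIndesejadas.any (fun s => PySem.Str.isIn s v)) with
      | true =>
        simp only [List.filter_cons, hbad, if_true, Bool.not_true, List.map_cons, List.mem_cons]
        simp
      | false =>
        simp only [List.filter_cons, hbad, Bool.false_eq_true, if_false, Bool.not_false]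
        constructor
        · intro h; exact absurd h.symm Bool.false_ne_true
        · intro h
          exfalso
          rcases List.mem_map.mp h with ⟨p, hp, hfst⟩
          exact hk (List.mem_map.mpr ⟨p, List.mem_of_mem_filter hp, hfst⟩)
    · have hbeq : (k == t) = false := by simp [hkt]
      rw [pvKeepA_cons_ne k v t hbeq, ih hrest]
      cases hbad : (classesGramaticaisIndesejadas.any (fun s => PySem.Str.isIn s v)) with
      | true =>
        simp only [List.filter_cons, hbad, if_true, List.map_cons, List.mem_cons]
        exact ⟨fun h => Or.inr h, fun h => h.resolve_left (fun he => hkt he.symm)⟩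
      | false =>
        simp only [List.filter_cons, hbad, Bool.false_eq_true, if_false]


theorem pvKeep_eq_not_contains (classificacoes : List (String × String))
    (hn : (classificacoes.map Prod.fst).Nodup) (t : String) :
    pvKeepA classificacoes t = !(PySem.Set.contains (pvBadKeys classificacoes) t) := by
  have hset : PySem.Set.contains (pvBadKeys classificacoes) t = true ↔
      t ∈ (classificacoes.filter
        (fun kv => classesGramaticaisIndesejadas.any (fun s => PySem.Str.isIn s kv.2))).map Prod.fst := by
    simp [pvBadKeys, PySem.Set.mem_ofList]
  cases h : pvKeepA classificacoes t
  · have := (pvKeep_eq_false_iff classificacoes hn t).mp h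
    rw [hset.mpr this]; rfl
  · have : ¬ (pvKeepA classificacoes t = false) := by simp [h]
    rw [pvKeep_eq_false_iff classificacoes hn t] at this
    have hc : PySem.Set.contains (pvBadKeys classificacoes) t = false := by
      cases hc' : PySem.Set.contains (pvBadKeys classificacoes) t
      · rfl
      · exact absurd (hset.mp hc') this
    rw [hc]; rfl

-- ===== VERDICT (by name: the statement is the Claim_ definition above) =====
theorem eliminar_classes_gramaticais_indesejadas_spec : Claim_equal_eliminar_classes_gramaticais_indesejadas := by
  intro tokens classificacoes _ hpre
  unfold Spec_eliminar_classes_gramaticais_indesejadas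
  unfold eliminar_classes_gramaticais_indesejadas eliminar_classes_gramaticais_indesejadas_alt
  rw [PySem.List.foldl_append_if_eq_filter]
  simp only [List.nil_append]
  exact List.filter_congr (fun t _ => pvKeep_eq_not_contains classificacoes hpre t)
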